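-- pv_equiv track=rewrite | github.com/noaione/nao-manga-rls | nmanga/pdfs.py | prefer_colorspace
-- ===== SOURCE A (Python) =====
-- def prefer_colorspace(colorspaces: list[str]) -> str:
--     """
--     Given a list of colorspaces, return the preferred one.
--
--     Preference order:
--     1. RGB
--     3. CMYK
--     2. Gray
--
--     Returns the corresponding PIL mode string.
--     """
--
--     if not colorspaces:
--         return "RGB"  # Default to RGB
--
--     def _determine(cs: str) -> int | None:
--         if "DeviceRGB" in cs:
--             return 1
--         if "DeviceCMYK" in cs:
--             return 2
--         if "DeviceGray" in cs:
--             return 3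
--         return None
--
--     colorspaces_coerce = sorted((cs for cs in (_determine(c) for c in colorspaces) if cs is not None))
--     if colorspaces_coerce:
--         if colorspaces_coerce[0] == 1:
--             return "RGB"
--         if colorspaces_coerce[0] == 2:
--             return "CMYK"
--         if colorspaces_coerce[0] == 3:
--             return "L"
--     if "None" in colorspaces:
--         return "RGB"
--     raise ValueError(f"Unknown colorspaces: {colorspaces}")
-- ===== SOURCE B (Python) =====
-- def prefer_colorspace(colorspaces: list[str]) -> str:
--     if not colorspaces:
--         return "RGB"  # Default to RGB
--     if any("DeviceRGB" in c for c in colorspaces):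
--         return "RGB"
--     if any("DeviceCMYK" in c for c in colorspaces):
--         return "CMYK"
--     if any("DeviceGray" in c for c in colorspaces):
--         return "L"
--     if "None" in colorspaces:
--         return "RGB"
--     raise ValueError(f"Unknown colorspaces: {colorspaces}")
-- ===== Notes on version B (the rewrite author's own statement) =====
-- stated objective: simpler
-- what changed: Replaces mapping every colorspace to a priority int, sorting the list and inspecting its minimum with three direct short-circuit any-scans in priority order, dropping the _determine helper, the intermediate list and the sort.
import Mathlib
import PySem

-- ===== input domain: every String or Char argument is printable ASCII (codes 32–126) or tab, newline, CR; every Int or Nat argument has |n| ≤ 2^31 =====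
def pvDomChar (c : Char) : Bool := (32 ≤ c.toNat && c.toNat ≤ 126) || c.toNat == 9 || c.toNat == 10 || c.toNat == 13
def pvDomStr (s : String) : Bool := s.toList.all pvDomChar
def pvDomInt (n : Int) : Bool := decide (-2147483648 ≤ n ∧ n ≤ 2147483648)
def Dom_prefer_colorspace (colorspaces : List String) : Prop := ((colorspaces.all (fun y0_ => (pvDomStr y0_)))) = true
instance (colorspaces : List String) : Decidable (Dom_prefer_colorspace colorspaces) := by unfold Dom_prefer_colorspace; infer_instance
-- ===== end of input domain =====

-- B replaces map-to-priority-int + sort + take-minimum by three short-circuit any-scans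
-- in priority order (simpler; the ValueError inputs are excluded by Pre_ below).

-- ===== PORT A =====
-- the inner helper _determine
def pvDetermine (cs : String) : Option Int :=
  if PySem.Str.isIn "DeviceRGB" cs then some 1
  else if PySem.Str.isIn "DeviceCMYK" cs then some 2
  else if PySem.Str.isIn "DeviceGray" cs then some 3
  else none

def prefer_colorspace (colorspaces : List String) : String :=
  if colorspaces = [] then "RGB"
  else
    -- sorted((cs for cs in (_determine(c) for c in colorspaces) if cs is not None))
    match PySem.List.sorted (colorspaces.filterMap pvDetermine) (fun x => x) false with
    | c :: _ =>
      if c = 1 then "RGB"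
      else if c = 2 then "CMYK"
      else if c = 3 then "L"
      else if "None" ∈ colorspaces then "RGB"
      else ""  -- raise ValueError — excluded by Pre_
    | [] =>
      if "None" ∈ colorspaces then "RGB"
      else ""  -- raise ValueError — excluded by Pre_

-- ===== PORT B =====
def prefer_colorspace_alt (colorspaces : List String) : String :=
  if colorspaces = [] then "RGB"
  else if colorspaces.any (fun c => PySem.Str.isIn "DeviceRGB" c) then "RGB"
  else if colorspaces.any (fun c => PySem.Str.isIn "DeviceCMYK" c) then "CMYK"
  else if colorspaces.any (fun c => PySem.Str.isIn "DeviceGray" c) then "L"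
  else if "None" ∈ colorspaces then "RGB"
  else ""  -- raise ValueError — excluded by Pre_

-- ===== PRECONDITION & SPEC =====
-- Pre_ excludes exactly the inputs on which A raises ValueError: a non-empty list with no
-- element containing DeviceRGB/DeviceCMYK/DeviceGray and no element equal to "None".
def Pre_prefer_colorspace (colorspaces : List String) : Prop :=
  colorspaces = [] ∨
  (colorspaces.any (fun c => PySem.Str.isIn "DeviceRGB" c || PySem.Str.isIn "DeviceCMYK" c
      || PySem.Str.isIn "DeviceGray" c)) = true ∨
  "None" ∈ colorspaces
instance (colorspaces : List String) : Decidable (Pre_prefer_colorspace colorspaces) := by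
  unfold Pre_prefer_colorspace; infer_instance

def pvWitness_prefer_colorspace : List String := ["DeviceRGB", "DeviceGray"]

def Spec_prefer_colorspace (colorspaces : List String) (out : String) : Prop := out = prefer_colorspace_alt colorspaces
instance (colorspaces : List String) (out : String) : Decidable (Spec_prefer_colorspace colorspaces out) := by unfold Spec_prefer_colorspace; infer_instance

-- ===== CLAIM (what is proved, stated in full; the proofs are below) =====
def Claim_equal_prefer_colorspace : Prop := ∀ (colorspaces : List String), Dom_prefer_colorspace colorspaces → Pre_prefer_colorspace colorspaces → Spec_prefer_colorspace colorspaces (prefer_colorspace colorspaces)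

-- ===== LEMMAS AND PROOFS =====

-- the head of sorted(L) (identity key) is a minimum element of L
theorem head_sorted_min {L : List Int} {m : Int} {t : List Int}
    (hs : PySem.List.sorted L (fun x => x) false = m :: t) :
    m ∈ L ∧ ∀ y ∈ L, m ≤ y := by
  constructor
  · exact (PySem.List.mem_sorted L (fun x => x) false m).1 (by simp [hs])
  · exact PySem.List.key_head_sorted_le L (fun x => x) hs

-- every priority produced by _determine is 1, 2 or 3
theorem mem_filterMap_det {colorspaces : List String} {v : Int}
    (hv : v ∈ colorspaces.filterMap pvDetermine) : v = 1 ∨ v = 2 ∨ v = 3 := by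
  rcases List.mem_filterMap.1 hv with ⟨c, _, hc⟩
  unfold pvDetermine at hc
  split_ifs at hc <;> simp_all

-- the two ports agree on every input (on the excluded ValueError inputs both return "")
theorem prefer_colorspace_eq_alt : ∀ (colorspaces : List String),
    prefer_colorspace colorspaces = prefer_colorspace_alt colorspaces := by
  intro colorspaces
  unfold prefer_colorspace prefer_colorspace_alt
  by_cases hnil : colorspaces = []
  · rw [if_pos hnil, if_pos hnil]
  rw [if_neg hnil, if_neg hnil]
  by_cases hrgb : (colorspaces.any (fun c => PySem.Str.isIn "DeviceRGB" c)) = true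
  · rw [if_pos hrgb]
    rcases List.any_eq_true.1 hrgb with ⟨c, hc, hdet⟩
    have h1 : (1 : Int) ∈ colorspaces.filterMap pvDetermine :=
      List.mem_filterMap.2 ⟨c, hc, by unfold pvDetermine; rw [if_pos hdet]⟩
    cases hs : PySem.List.sorted (colorspaces.filterMap pvDetermine) (fun x => x) false with
    | nil =>
      exact absurd ((PySem.List.sorted_eq_nil_iff _ _ _).1 hs) (by intro h; rw [h] at h1; simp at h1)
    | cons m t =>
      obtain ⟨hm, hmin⟩ := head_sorted_min hs
      have hm1 : m = 1 := by
        have := hmin 1 h1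
        rcases mem_filterMap_det hm with h | h | h <;> omega
      rw [hm1]; rfl
  · have hnoRGB : ∀ c ∈ colorspaces, PySem.Str.isIn "DeviceRGB" c = false :=
      fun c hc => Bool.eq_false_iff.2 (List.any_eq_false.1 (Bool.eq_false_iff.2 hrgb) c hc)
    rw [if_neg hrgb]
    by_cases hcmyk : (colorspaces.any (fun c => PySem.Str.isIn "DeviceCMYK" c)) = true
    · rw [if_pos hcmyk]
      rcases List.any_eq_true.1 hcmyk with ⟨c, hc, hdet⟩
      have h2 : (2 : Int) ∈ colorspaces.filterMap pvDetermine :=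
        List.mem_filterMap.2 ⟨c, hc, by
          unfold pvDetermine; rw [if_neg (Bool.eq_false_iff.1 (hnoRGB c hc)), if_pos hdet]⟩
      have hge : ∀ v ∈ colorspaces.filterMap pvDetermine, (2 : Int) ≤ v := by
        intro v hv
        rcases List.mem_filterMap.1 hv with ⟨c', hc', hdet'⟩
        unfold pvDetermine at hdet'
        rw [if_neg (Bool.eq_false_iff.1 (hnoRGB c' hc'))] at hdet'
        split_ifs at hdet' <;> simp_all
        omega
      cases hs : PySem.List.sorted (colorspaces.filterMap pvDetermine) (fun x => x) false with
      | nil =>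
        exact absurd ((PySem.List.sorted_eq_nil_iff _ _ _).1 hs) (by intro h; rw [h] at h2; simp at h2)
      | cons m t =>
        obtain ⟨hm, hmin⟩ := head_sorted_min hs
        have hm2 : m = 2 := le_antisymm (hmin 2 h2) (hge m hm)
        rw [hm2]; rfl
    · have hnoC : ∀ c ∈ colorspaces, PySem.Str.isIn "DeviceCMYK" c = false :=
        fun c hc => Bool.eq_false_iff.2 (List.any_eq_false.1 (Bool.eq_false_iff.2 hcmyk) c hc)
      rw [if_neg hcmyk]
      by_cases hgray : (colorspaces.any (fun c => PySem.Str.isIn "DeviceGray" c)) = true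
      · rw [if_pos hgray]
        rcases List.any_eq_true.1 hgray with ⟨c, hc, hdet⟩
        have h3 : (3 : Int) ∈ colorspaces.filterMap pvDetermine :=
          List.mem_filterMap.2 ⟨c, hc, by
            unfold pvDetermine
            rw [if_neg (Bool.eq_false_iff.1 (hnoRGB c hc)), if_neg (Bool.eq_false_iff.1 (hnoC c hc)), if_pos hdet]⟩
        have hge : ∀ v ∈ colorspaces.filterMap pvDetermine, (3 : Int) ≤ v := by
          intro v hv
          rcases List.mem_filterMap.1 hv with ⟨c', hc', hdet'⟩
          unfold pvDetermine at hdet'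
          rw [if_neg (Bool.eq_false_iff.1 (hnoRGB c' hc')), if_neg (Bool.eq_false_iff.1 (hnoC c' hc'))] at hdet'
          split_ifs at hdet'; simp_all
        cases hs : PySem.List.sorted (colorspaces.filterMap pvDetermine) (fun x => x) false with
        | nil =>
          exact absurd ((PySem.List.sorted_eq_nil_iff _ _ _).1 hs) (by intro h; rw [h] at h3; simp at h3)
        | cons m t =>
          obtain ⟨hm, hmin⟩ := head_sorted_min hs
          have hm3 : m = 3 := le_antisymm (hmin 3 h3) (hge m hm)
          rw [hm3]; rfl
      · have hnoG : ∀ c ∈ colorspaces, PySem.Str.isIn "DeviceGray" c = false :=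
          fun c hc => Bool.eq_false_iff.2 (List.any_eq_false.1 (Bool.eq_false_iff.2 hgray) c hc)
        rw [if_neg hgray]
        have hFM : colorspaces.filterMap pvDetermine = [] := by
          rw [List.filterMap_eq_nil_iff]
          intro c hc
          unfold pvDetermine
          rw [if_neg (Bool.eq_false_iff.1 (hnoRGB c hc)), if_neg (Bool.eq_false_iff.1 (hnoC c hc)),
              if_neg (Bool.eq_false_iff.1 (hnoG c hc))]
        rw [hFM]
        rfl

-- ===== VERDICT (by name: the statement is the Claim_ definition above) =====
theorem prefer_colorspace_spec : Claim_equal_prefer_colorspace := by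
  intro colorspaces _ _
  exact prefer_colorspace_eq_alt colorspaces
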